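-- pv_equiv track=rewrite | github.com/Ch1nyzzz/AgentGEO | attr_evaluator/fast_return_res.py | _count_citations
-- ===== SOURCE A (Python) =====
-- from typing import List, Dict, Any, Optional, Tuple
--
-- def _count_citations(data: Dict) -> List[int]:
--     """计算引用计数"""
--     if not data.get("document"):
--         return []
--
--     num_documents = len(data["document"])
--     citations = [0] * num_documents
--
--     # 统计每个文档的引用次数
--     highlights = data.get("set_of_highlights_in_context", [])
--     cited_indices = {int(h.get('documentFile', 0)) for h in highlights if h.get('documentFile') is not None}
--
--     for idx in cited_indices:
--         if 0 <= idx < num_documents: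
--             citations[idx] = 1
--
--     return citations
-- ===== SOURCE B (Python) =====
-- from typing import List, Dict
--
-- def _count_citations(data: Dict) -> List[int]:
--     docs = data.get("document")
--     if not docs:
--         return []
--     highlights = data.get("set_of_highlights_in_context", [])
--
--     def cited(i):
--         return any(h.get('documentFile') is not None and int(h['documentFile']) == i
--                    for h in highlights)
--
--     return [1 if cited(i) else 0 for i in range(len(docs))]
-- ===== Notes on version B (the rewrite author's own statement) =====
-- stated objective: alternative
-- what changed: B inverts the traversal: instead of collecting a set of cited indices and mutating a preallocated zero list, it builds the output positionally, computing each entry as a membership scan of the highlights (no intermediate set, no in-place writes).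
import Mathlib
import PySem

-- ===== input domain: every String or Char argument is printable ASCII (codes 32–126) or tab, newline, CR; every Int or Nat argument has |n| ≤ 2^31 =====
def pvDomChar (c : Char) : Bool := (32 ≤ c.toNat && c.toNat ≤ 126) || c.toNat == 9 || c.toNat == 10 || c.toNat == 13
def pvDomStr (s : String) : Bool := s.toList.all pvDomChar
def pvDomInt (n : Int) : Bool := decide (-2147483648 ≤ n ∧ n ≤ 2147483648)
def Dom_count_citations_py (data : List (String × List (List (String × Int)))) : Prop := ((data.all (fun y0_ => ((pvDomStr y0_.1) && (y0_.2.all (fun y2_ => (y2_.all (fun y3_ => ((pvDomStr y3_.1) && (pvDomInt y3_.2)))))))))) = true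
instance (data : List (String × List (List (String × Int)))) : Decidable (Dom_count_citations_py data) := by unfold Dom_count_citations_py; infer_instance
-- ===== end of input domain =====

-- B builds the output positionally (one membership scan of the highlights per document index)
-- instead of A's cited-index set plus in-place marking (objective: alternative; not faster).


-- ===== PORT A =====
-- 'citations[idx] = 1' under the guard '0 <= idx < num_documents'
def pvWriteA (n : Int) (cits : List Int) (idx : Int) : List Int :=
  if 0 ≤ idx ∧ idx < n then cits.set idx.toNat 1 else cits

def count_citations_py (data : List (String × List (List (String × Int)))) : List Int :=
  match PySem.Dict.get? (PySem.Dict.mk data) "document" with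
  | none => []                                   -- data.get("document") is None → falsy
  | some docs =>
    if docs = [] then []                         -- empty list is falsy too
    else
      let num_documents : Int := docs.length
      let citations : List Int := List.replicate docs.length 0
      let highlights := PySem.Dict.getD (PySem.Dict.mk data) "set_of_highlights_in_context" []
      -- {int(h.get('documentFile', 0)) for h in highlights if h.get('documentFile') is not None}
      let cited_indices : PySem.Set Int :=
        PySem.Set.ofList
          ((highlights.filter (fun h => (PySem.Dict.get? (PySem.Dict.mk h) "documentFile").isSome)).map
            (fun h => PySem.Dict.getD (PySem.Dict.mk h) "documentFile" 0))
      -- for idx in cited_indices: if 0 <= idx < num_documents: citations[idx] = 1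
      -- (set iteration order is not modelled; every write stores 1, so the result is order-independent)
      cited_indices.foldl (pvWriteA num_documents) citations

-- ===== PORT B =====
-- any(h.get('documentFile') is not None and int(h['documentFile']) == i for h in highlights)
def pvCited (hs : List (List (String × Int))) (i : Int) : Bool :=
  hs.any (fun h =>
    match PySem.Dict.get? (PySem.Dict.mk h) "documentFile" with
    | none => false
    | some v => v == i)

def count_citations_py_alt (data : List (String × List (List (String × Int)))) : List Int :=
  match PySem.Dict.get? (PySem.Dict.mk data) "document" with
  | none => []
  | some docs =>
    if docs = [] then []
    else
      let highlights := PySem.Dict.getD (PySem.Dict.mk data) "set_of_highlights_in_context" []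
      -- [1 if cited(i) else 0 for i in range(len(docs))]
      (PySem.List.pyRange 0 docs.length 1).map
        (fun i => if pvCited highlights i then 1 else 0)

-- ===== PRECONDITION & SPEC =====
def Spec_count_citations_py (data : List (String × List (List (String × Int)))) (out : List Int) : Prop := out = count_citations_py_alt data
instance (data : List (String × List (List (String × Int)))) (out : List Int) : Decidable (Spec_count_citations_py data out) := by unfold Spec_count_citations_py; infer_instance

-- ===== CLAIM =====
def Claim_equal_count_citations_py : Prop := ∀ (data : List (String × List (List (String × Int)))), Dom_count_citations_py data → Spec_count_citations_py data (count_citations_py data)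

-- ===== LEMMAS AND PROOFS =====

theorem pvWriteA_length (n : Int) (cits : List Int) (idx : Int) :
    (pvWriteA n cits idx).length = cits.length := by
  unfold pvWriteA; split <;> simp

theorem foldl_pvWriteA_length (n : Int) (l : List Int) (cits : List Int) :
    (l.foldl (pvWriteA n) cits).length = cits.length := by
  induction l generalizing cits with
  | nil => rfl
  | cons a t ih => simp [List.foldl, ih, pvWriteA_length]

-- position i of the marking fold: 1 if some in-range index of l hits i, else the old value
theorem foldl_pvWriteA_get (n : Int) (l : List Int) (cits : List Int) (i : Nat)
    (hi : i < cits.length) (hcn : (cits.length : Int) = n) :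
    (l.foldl (pvWriteA n) cits)[i]'(by rw [foldl_pvWriteA_length]; exact hi) =
      if (i : Int) ∈ l then 1 else cits[i] := by
  induction l generalizing cits with
  | nil => simp
  | cons a t ih =>
    simp only [List.foldl]
    rw [ih (pvWriteA n cits a) (by rw [pvWriteA_length]; exact hi)
        (by rw [pvWriteA_length]; exact hcn)]
    by_cases hmem : (i : Int) ∈ t
    · simp [hmem]
    · simp only [hmem, if_false, List.mem_cons, or_false]
      unfold pvWriteA
      by_cases hx : (i : Int) = a
      · subst hx
        have hrange : 0 ≤ (i : Int) ∧ (i : Int) < n := ⟨Int.natCast_nonneg i, by omega⟩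
        simp [hrange]
      · simp only [hx, if_false]
        split
        · rename_i hr
          rw [List.getElem_set]
          have : (Int.toNat a) ≠ i := by omega
          simp [this]
        · rfl

-- B's membership scan decides membership in A's extracted index list
theorem pvCited_iff_mem (hs : List (List (String × Int))) (i : Int) :
    pvCited hs i = true ↔
      i ∈ (hs.filter (fun h => (PySem.Dict.get? (PySem.Dict.mk h) "documentFile").isSome)).map
            (fun h => PySem.Dict.getD (PySem.Dict.mk h) "documentFile" 0) := by
  induction hs with
  | nil => simp [pvCited]
  | cons h t ih =>
    simp only [pvCited, List.any_cons, List.filter]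
    cases hv : PySem.Dict.get? (PySem.Dict.mk h) "documentFile" with
    | none =>
      simpa [pvCited, hv] using ih
    | some v =>
      simp only [Option.isSome_some, List.map, List.mem_cons, Bool.or_eq_true]
      constructor
      · rintro (hveq | htail)
        · left; rw [PySem.Dict.getD_eq_get?_getD, hv]; simp at hveq; simp [hveq]
        · right; exact (ih.mp (by simpa [pvCited] using htail))
      · rintro (hveq | htail)
        · left; rw [PySem.Dict.getD_eq_get?_getD, hv] at hveq; simp at hveq; simp [hveq]
        · right; simpa [pvCited] using ih.mpr htail

theorem count_citations_py_eq_alt (data : List (String × List (List (String × Int)))) :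
    count_citations_py data = count_citations_py_alt data := by
  unfold count_citations_py count_citations_py_alt
  cases hd : PySem.Dict.get? (PySem.Dict.mk data) "document" with
  | none => rfl
  | some docs =>
    simp only
    split
    · rfl
    · set hs := PySem.Dict.getD (PySem.Dict.mk data) "set_of_highlights_in_context" [] with hhs
      set vals := (hs.filter
          (fun h => (PySem.Dict.get? (PySem.Dict.mk h) "documentFile").isSome)).map
          (fun h => PySem.Dict.getD (PySem.Dict.mk h) "documentFile" 0) with hvals
      apply List.ext_getElem
      · simp [foldl_pvWriteA_length, PySem.List.length_pyRange_one]
      · intro i h1 h2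
        have hi : i < (List.replicate docs.length (0 : Int)).length := by
          simpa [foldl_pvWriteA_length] using h1
        have hcn : ((List.replicate docs.length (0 : Int)).length : Int) = (docs.length : Int) := by
          simp
        rw [foldl_pvWriteA_get _ _ _ _ hi hcn]
        have hlen : i < (PySem.List.pyRange 0 docs.length 1).length := by
          simpa using h2
        rw [List.getElem_map]
        have hri : (PySem.List.pyRange 0 (docs.length : Int) 1)[i]'hlen = (i : Int) := by
          rw [PySem.List.getElem_pyRange_one]; ring
        rw [hri]
        have hmem := pvCited_iff_mem hs (i : Int)
        have hset : ((i : Int) ∈ PySem.Set.ofList vals) ↔ ((i : Int) ∈ vals) :=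
          PySem.Set.mem_ofList vals (i : Int)
        by_cases hm : (i : Int) ∈ vals
        · simp [hset.mpr hm, hmem.mpr hm]
        · have : pvCited hs (i : Int) = false := by
            rcases Bool.eq_false_or_eq_true (pvCited hs (i : Int)) with h | h
            · exact absurd (hmem.mp h) hm
            · exact h
          simp [hset, hm, this]

-- ===== VERDICT =====
theorem count_citations_py_spec : Claim_equal_count_citations_py := by
  intro data _
  exact count_citations_py_eq_alt data
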